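-- pv_equiv track=rewrite | github.com/Hercules03/AI-Resume-Analyzer | App/extractors/profile_extractor.py | _merge_profile_results
-- ===== SOURCE A (Python) =====
-- from typing import Dict, Any, List, Tuple, Set, Optional, Type
--
-- def _merge_profile_results(profile_lists: List[Dict[str, Any]]) -> Dict[str, Any]:
--     """Merge multiple profile extraction results."""
--     merged = {}
--
--     # Define priority order for conflicting values
--     priority_fields = ['email', 'phone', 'name', 'linkedin', 'github', 'portfolio', 'address']
--
--     for profile_dict in profile_lists:
--         for field, value in profile_dict.items():
--             if value and value.strip():
--                 if field not in merged or not merged[field]: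
--                     merged[field] = value
--                 elif field in priority_fields:
--                     # Keep the longer/more complete value
--                     if len(str(value)) > len(str(merged[field])):
--                         merged[field] = value
--
--     return merged
-- ===== SOURCE B (Python) =====
-- def _merge_profile_results(profile_lists):
--     """Merge multiple profile extraction results (index-build + per-field reduction)."""
--     priority_fields = ['email', 'phone', 'name', 'linkedin', 'github', 'portfolio', 'address']
--     grouped = {}
--     for profile_dict in profile_lists:
--         for field, value in profile_dict.items():
--             if value and value.strip():
--                 grouped.setdefault(field, []).append(value)
--     merged = {}
--     for field, values in grouped.items():
--         if field in priority_fields: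
--             best = values[0]
--             for v in values[1:]:
--                 if len(str(v)) > len(str(best)):
--                     best = v
--             merged[field] = best
--         else:
--             merged[field] = values[0]
--     return merged
-- ===== Notes on version B (the rewrite author's own statement) =====
-- stated objective: alternative
-- what changed: Replaces A's single interleaved merge-as-you-go pass with two phases: first build an index mapping each field to the ordered list of accepted values, then reduce each field's list (first value for ordinary fields, longest-with-first-tie-win for priority fields).
import Mathlib
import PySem

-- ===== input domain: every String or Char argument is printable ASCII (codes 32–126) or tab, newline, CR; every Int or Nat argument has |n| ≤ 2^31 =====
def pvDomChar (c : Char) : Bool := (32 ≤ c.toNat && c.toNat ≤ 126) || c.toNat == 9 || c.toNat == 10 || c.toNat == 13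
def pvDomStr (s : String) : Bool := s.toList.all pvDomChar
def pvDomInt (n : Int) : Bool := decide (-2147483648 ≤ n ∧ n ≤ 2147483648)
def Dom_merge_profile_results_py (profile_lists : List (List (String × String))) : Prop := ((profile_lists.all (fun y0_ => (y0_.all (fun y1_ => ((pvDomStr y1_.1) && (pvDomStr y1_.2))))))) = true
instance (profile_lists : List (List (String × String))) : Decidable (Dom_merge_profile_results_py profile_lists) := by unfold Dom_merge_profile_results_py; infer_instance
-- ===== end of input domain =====

-- B replaces A's interleaved merge-as-you-go pass by an index-building phase (field → ordered accepted values)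
-- followed by a per-field reduction; same results, alternative decomposition (no speed claim).

def pvPriority : List String := ["email", "phone", "name", "linkedin", "github", "portfolio", "address"]

-- ===== PORT A =====
def merge_profile_results_py (profile_lists : List (List (String × String))) : List (String × String) :=
  (profile_lists.foldl (fun merged profile_dict =>
      profile_dict.foldl (fun merged p =>
        if p.2 ≠ "" ∧ PySem.Str.strip p.2 ≠ "" then
          match merged.get? p.1 with
          | none => merged.insert p.1 p.2
          | some cur =>
            if cur = "" then merged.insert p.1 p.2
            else if p.1 ∈ pvPriority then
              if PySem.Str.len p.2 > PySem.Str.len cur then merged.insert p.1 p.2 else merged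
            else merged
        else merged) merged)
    (PySem.Dict.empty : PySem.Dict String String)).items

-- ===== PORT B =====
def merge_profile_results_py_alt (profile_lists : List (List (String × String))) : List (String × String) :=
  let grouped : PySem.Dict String (List String) :=
    profile_lists.foldl (fun grouped profile_dict =>
      profile_dict.foldl (fun grouped p =>
        if p.2 ≠ "" ∧ PySem.Str.strip p.2 ≠ "" then
          grouped.modify p.1 [] (fun vs => vs ++ [p.2])
        else grouped) grouped)
      PySem.Dict.empty
  (grouped.items.foldl (fun merged fv =>
      if fv.1 ∈ pvPriority then
        merged.insert fv.1 ((fv.2.drop 1).foldl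
          (fun best v => if PySem.Str.len v > PySem.Str.len best then v else best) (fv.2.headD ""))
      else merged.insert fv.1 (fv.2.headD ""))
    (PySem.Dict.empty : PySem.Dict String String)).items

-- ===== PRECONDITION & SPEC =====
def Spec_merge_profile_results_py (profile_lists : List (List (String × String))) (out : List (String × String)) : Prop := out = merge_profile_results_py_alt profile_lists
instance (profile_lists : List (List (String × String))) (out : List (String × String)) : Decidable (Spec_merge_profile_results_py profile_lists out) := by unfold Spec_merge_profile_results_py; infer_instance

-- ===== CLAIM (what is proved, stated in full; the proofs are below) =====
def Claim_equal_merge_profile_results_py : Prop := ∀ (profile_lists : List (List (String × String))), Dom_merge_profile_results_py profile_lists → Spec_merge_profile_results_py profile_lists (merge_profile_results_py profile_lists)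

-- ===== LEMMAS AND PROOFS =====

def pvGuard (p : String × String) : Bool := decide (p.2 ≠ "" ∧ PySem.Str.strip p.2 ≠ "")

def pvPick (f : String) (vs : List String) : String :=
  if f ∈ pvPriority then
    (vs.drop 1).foldl (fun best v => if PySem.Str.len v > PySem.Str.len best then v else best) (vs.headD "")
  else vs.headD ""

def pvRender (g : PySem.Dict String (List String)) : PySem.Dict String String :=
  PySem.Dict.mk (g.items.map (fun q => (q.1, pvPick q.1 q.2)))

def pvCoreA (merged : PySem.Dict String String) (p : String × String) : PySem.Dict String String :=
  match merged.get? p.1 with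
  | none => merged.insert p.1 p.2
  | some cur =>
    if cur = "" then merged.insert p.1 p.2
    else if p.1 ∈ pvPriority then
      if PySem.Str.len p.2 > PySem.Str.len cur then merged.insert p.1 p.2 else merged
    else merged

def pvCoreB (g : PySem.Dict String (List String)) (p : String × String) : PySem.Dict String (List String) :=
  g.modify p.1 [] (fun vs => vs ++ [p.2])

def pvInv (g : PySem.Dict String (List String)) : Prop :=
  g.keys.Nodup ∧ ∀ q ∈ g.items, q.2 ≠ [] ∧ ∀ v ∈ q.2, v ≠ ""

lemma pvPick_singleton (k v : String) : pvPick k [v] = v := by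
  unfold pvPick; split <;> rfl

lemma pvRed_mem (t : List String) (b : String) :
    t.foldl (fun best v => if PySem.Str.len v > PySem.Str.len best then v else best) b ∈ b :: t := by
  induction t generalizing b with
  | nil => simp
  | cons w t ih =>
    simp only [List.foldl_cons]
    rcases List.mem_cons.mp (ih (if PySem.Str.len w > PySem.Str.len b then w else b)) with h | h
    · rw [h]; split <;> simp
    · exact List.mem_cons_of_mem _ (List.mem_cons_of_mem _ h)

lemma pvPick_mem (k : String) (vs : List String) (h : vs ≠ []) : pvPick k vs ∈ vs := by
  obtain ⟨a, t, rfl⟩ := List.exists_cons_of_ne_nil h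
  unfold pvPick
  split
  · simpa using pvRed_mem t a
  · simp

lemma pvPick_append (k v : String) (vs : List String) (h : vs ≠ []) :
    pvPick k (vs ++ [v]) =
      if k ∈ pvPriority then
        (if PySem.Str.len v > PySem.Str.len (pvPick k vs) then v else pvPick k vs)
      else pvPick k vs := by
  obtain ⟨a, t, rfl⟩ := List.exists_cons_of_ne_nil h
  unfold pvPick
  split
  · simp [List.foldl_append]
  · simp

lemma pvRender_get?' (l : List (String × List String)) (k : String) :
    (PySem.Dict.mk (l.map (fun q => (q.1, pvPick q.1 q.2)))).get? k
      = ((PySem.Dict.mk l).get? k).map (pvPick k) := by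
  induction l with
  | nil => rfl
  | cons q t ih =>
    obtain ⟨qk, qv⟩ := q
    simp only [List.map_cons, PySem.Dict.get?_mk_cons]
    by_cases h : qk == k
    · have : qk = k := eq_of_beq h
      subst this; simp
    · simp [h, ih]

lemma pvRender_get? (g : PySem.Dict String (List String)) (k : String) :
    (pvRender g).get? k = (g.get? k).map (pvPick k) := by
  obtain ⟨l⟩ := g; exact pvRender_get?' l k

lemma pvStep (g : PySem.Dict String (List String)) (p : String × String)
    (hinv : pvInv g) (_hv : p.2 ≠ "") :
    pvCoreA (pvRender g) p = pvRender (pvCoreB g p) := by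
  obtain ⟨hnd, hvals⟩ := hinv
  cases hg : g.get? p.1 with
  | none =>
    have hc : g.contains p.1 = false := by
      rw [PySem.Dict.contains_eq_isSome_get?, hg]; rfl
    have hrg : (pvRender g).get? p.1 = none := by rw [pvRender_get?, hg]; rfl
    have hrc : (pvRender g).contains p.1 = false := by
      rw [PySem.Dict.contains_eq_isSome_get?, hrg]; rfl
    have hgD : g.getD p.1 [] = [] := PySem.Dict.getD_of_get?_eq_none g [] hg
    unfold pvCoreA pvCoreB
    rw [hrg]
    apply PySem.Dict.ext
    rw [PySem.Dict.items_insert_of_not_contains _ _ hrc]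
    show (pvRender g).items ++ [(p.1, p.2)] = (pvRender (g.modify p.1 [] (fun vs => vs ++ [p.2]))).items
    simp only [PySem.Dict.modify, hgD, List.nil_append]
    unfold pvRender
    rw [PySem.Dict.items_insert_of_not_contains _ _ hc]
    simp [pvPick_singleton]
  | some vs =>
    have hmem : (p.1, vs) ∈ g.items := PySem.Dict.mem_items_of_get?_eq_some g hg
    obtain ⟨hne, hvs⟩ := hvals _ hmem
    have hc : g.contains p.1 = true := by
      rw [PySem.Dict.contains_eq_isSome_get?, hg]; rfl
    have hrg : (pvRender g).get? p.1 = some (pvPick p.1 vs) := by rw [pvRender_get?, hg]; rfl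
    have hrc : (pvRender g).contains p.1 = true := by
      rw [PySem.Dict.contains_eq_isSome_get?, hrg]; rfl
    have hcur : pvPick p.1 vs ≠ "" := hvs _ (pvPick_mem p.1 vs hne)
    have hgD : g.getD p.1 [] = vs := PySem.Dict.getD_of_get?_eq_some g [] hg
    have huniq : ∀ q ∈ g.items, q.1 = p.1 → q.2 = vs := by
      intro q hq hk
      have h1 : g.get? q.1 = some q.2 := PySem.Dict.get?_of_mem_items g (by simpa using hq) hnd
      rw [hk, hg] at h1
      exact (Option.some.inj h1).symm
    have hR : (pvRender (pvCoreB g p)).items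
        = g.items.map (fun q => if q.1 = p.1 then (p.1, pvPick p.1 (vs ++ [p.2]))
            else (q.1, pvPick q.1 q.2)) := by
      unfold pvRender pvCoreB
      simp only [PySem.Dict.modify, hgD, PySem.Dict.items_insert_of_contains _ _ hc, List.map_map]
      apply List.map_congr_left
      intro q hq
      by_cases h : q.1 = p.1 <;> simp [h]
    unfold pvCoreA
    rw [hrg]
    simp only [if_neg hcur]
    apply PySem.Dict.ext
    rw [hR, pvPick_append _ _ _ hne]
    split_ifs with hp hlen
    · rw [PySem.Dict.items_insert_of_contains _ _ hrc]
      show ((pvRender g).items).map _ = _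
      unfold pvRender
      rw [List.map_map]
      apply List.map_congr_left
      intro q hq
      by_cases h : q.1 = p.1 <;> simp [h]
    · show (pvRender g).items = _
      unfold pvRender
      apply List.map_congr_left
      intro q hq
      by_cases h : q.1 = p.1
      · simp [h, huniq q hq h]
      · simp [h]
    · show (pvRender g).items = _
      unfold pvRender
      apply List.map_congr_left
      intro q hq
      by_cases h : q.1 = p.1
      · simp [h, huniq q hq h]
      · simp [h]

lemma pvInv_step (g : PySem.Dict String (List String)) (p : String × String)
    (hinv : pvInv g) (hv : p.2 ≠ "") : pvInv (pvCoreB g p) := by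
  obtain ⟨hnd, hvals⟩ := hinv
  unfold pvCoreB
  constructor
  · simp only [PySem.Dict.modify]
    exact PySem.Dict.nodup_keys_insert _ _ _ hnd
  · intro q hq
    simp only [PySem.Dict.modify] at hq
    rcases (PySem.Dict.mem_items_insert _ _ _ _).mp hq with h | ⟨h, _⟩
    · subst h
      refine ⟨by simp, ?_⟩
      intro v hvm
      rcases List.mem_append.mp hvm with h2 | h2
      · cases hgd : g.get? p.1 with
        | none => rw [PySem.Dict.getD_of_get?_eq_none g [] hgd] at h2; simp at h2
        | some vs =>
          rw [PySem.Dict.getD_of_get?_eq_some g [] hgd] at h2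
          exact (hvals _ (PySem.Dict.mem_items_of_get?_eq_some g hgd)).2 v h2
      · simp at h2; subst h2; exact hv
    · exact hvals _ h

lemma pvFold (ps : List (String × String)) (g : PySem.Dict String (List String))
    (hinv : pvInv g) (hps : ∀ p ∈ ps, p.2 ≠ "") :
    ps.foldl pvCoreA (pvRender g) = pvRender (ps.foldl pvCoreB g) := by
  induction ps generalizing g with
  | nil => rfl
  | cons p t ih =>
    simp only [List.foldl_cons]
    rw [pvStep g p hinv (hps p (by simp)),
      ih (pvCoreB g p) (pvInv_step g p hinv (hps p (by simp)))
        (fun q hq => hps q (by simp [hq]))]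

lemma pvInv_fold (ps : List (String × String)) (g : PySem.Dict String (List String))
    (hinv : pvInv g) (hps : ∀ p ∈ ps, p.2 ≠ "") : pvInv (ps.foldl pvCoreB g) := by
  induction ps generalizing g with
  | nil => exact hinv
  | cons p t ih =>
    exact ih (pvCoreB g p) (pvInv_step g p hinv (hps p (by simp)))
      (fun q hq => hps q (by simp [hq]))


lemma pvPortA_eq (xs : List (String × String)) (d : PySem.Dict String String) :
    xs.foldl (fun merged p =>
      if p.2 ≠ "" ∧ PySem.Str.strip p.2 ≠ "" then
        match merged.get? p.1 with
        | none => merged.insert p.1 p.2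
        | some cur =>
          if cur = "" then merged.insert p.1 p.2
          else if p.1 ∈ pvPriority then
            if PySem.Str.len p.2 > PySem.Str.len cur then merged.insert p.1 p.2 else merged
          else merged
      else merged) d = (xs.filter pvGuard).foldl pvCoreA d := by
  rw [List.foldl_filter]
  congr 1
  funext m p
  by_cases h : p.2 ≠ "" ∧ PySem.Str.strip p.2 ≠ ""
  · simp [pvGuard, pvCoreA, h]
  · simp [pvGuard, h]

lemma pvPortB_eq (xs : List (String × String)) (d : PySem.Dict String (List String)) :
    xs.foldl (fun grouped p =>
      if p.2 ≠ "" ∧ PySem.Str.strip p.2 ≠ "" then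
        grouped.modify p.1 [] (fun vs => vs ++ [p.2])
      else grouped) d = (xs.filter pvGuard).foldl pvCoreB d := by
  rw [List.foldl_filter]
  congr 1
  funext g p
  by_cases h : p.2 ≠ "" ∧ PySem.Str.strip p.2 ≠ ""
  · simp [pvGuard, pvCoreB, h]
  · simp [pvGuard, h]

lemma pvPhase2 (G : PySem.Dict String (List String)) (hinv : pvInv G) :
    (G.items.foldl (fun merged fv =>
        if fv.1 ∈ pvPriority then
          merged.insert fv.1 ((fv.2.drop 1).foldl
            (fun best v => if PySem.Str.len v > PySem.Str.len best then v else best) (fv.2.headD ""))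
        else merged.insert fv.1 (fv.2.headD ""))
      (PySem.Dict.empty : PySem.Dict String String)).items = (pvRender G).items := by
  have hstep : (fun (merged : PySem.Dict String String) (fv : String × List String) =>
      if fv.1 ∈ pvPriority then
        merged.insert fv.1 ((fv.2.drop 1).foldl
          (fun best v => if PySem.Str.len v > PySem.Str.len best then v else best) (fv.2.headD ""))
      else merged.insert fv.1 (fv.2.headD ""))
      = fun merged fv => merged.insert fv.1 (pvPick fv.1 fv.2) := by
    funext m fv
    unfold pvPick
    by_cases h : fv.1 ∈ pvPriority <;> simp [h]
  rw [hstep]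
  rw [PySem.Dict.items_foldl_insert_fresh G.items (fun fv => fv.1) (fun fv => pvPick fv.1 fv.2)
    PySem.Dict.empty (fun a _ => rfl) (by simpa [PySem.Dict.keys] using hinv.1)]
  simp [pvRender, PySem.Dict.empty]

-- ===== VERDICT (by name: the statement is the Claim_ definition above) =====
theorem merge_profile_results_py_spec : Claim_equal_merge_profile_results_py := by
  intro pls _
  unfold Spec_merge_profile_results_py merge_profile_results_py merge_profile_results_py_alt
  rw [← List.foldl_flatten, ← List.foldl_flatten, pvPortA_eq, pvPortB_eq]
  have hfilter : ∀ p ∈ pls.flatten.filter pvGuard, p.2 ≠ "" := by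
    intro p hp
    have h := List.of_mem_filter hp
    simp only [pvGuard, decide_eq_true_eq] at h
    exact h.1
  have hinv0 : pvInv (PySem.Dict.empty : PySem.Dict String (List String)) := by
    constructor
    · exact List.nodup_nil
    · intro q hq
      exact absurd hq (by simp [PySem.Dict.empty])
  have h1 := pvFold (pls.flatten.filter pvGuard) PySem.Dict.empty hinv0 hfilter
  rw [show pvRender (PySem.Dict.empty : PySem.Dict String (List String))
      = (PySem.Dict.empty : PySem.Dict String String) from rfl] at h1
  rw [h1]
  exact (pvPhase2 _ (pvInv_fold _ _ hinv0 hfilter)).symm
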